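-- pv_equiv track=rewrite | github.com/TanveshT/Competitive-Programming | Google Foobar Challenge/3a.py | solution
-- ===== SOURCE A (Python) =====
-- def getXOR(n):
--
--     remainder = n%4
--
--     if remainder == 0:
--         return n
--     elif remainder == 1:
--         return 1
--     elif remainder == 2:
--         return n+1
--     else:
--         return 0
--
-- def solution(start, length):
--
--     i = 0
--     checkSum = None
--     while(length > 0):
--         left = start -1
--         right = start + length -1
--
--         x = getXOR(left) ^ getXOR(right)
--
--         if checkSum == None:
--             checkSum = x
--         else:
--             checkSum = checkSum^x
--
--         length -= 1
--         start = right + i + 1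
--         i += 1
--     return checkSum
-- ===== SOURCE B (Python) =====
-- def solution(start, length):
--     if length <= 0:
--         return None
--
--     def f(n):
--         # XOR of 0..n (valid as the closed form A uses on the same residues)
--         return (n, 1, n + 1, 0)[n % 4]
--
--     last = start + length * length - length          # end of the final (width-1) row
--     acc = f(start - 1) ^ f(last)                     # XOR of the whole span start..last
--     for k in range(1, length - 1):                   # cancel the skipped gap after row k
--         lo = start + k * length + length - k         # first skipped cell after row k
--         hi = start + (k + 1) * length - 1            # last skipped cell before row k+1
--         acc ^= f(lo - 1) ^ f(hi)
--     return acc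
-- ===== Notes on version B (the rewrite author's own statement) =====
-- stated objective: alternative
-- what changed: B replaces A's row-by-row XOR accumulation over the staircase (mutating start/right/i each iteration) by a complement algorithm: XOR of the one contiguous span from the first cell to the last row's end, cancelled against the XOR of the skipped gap ranges between consecutive rows, with row starts in closed form start + k*length.
import Mathlib
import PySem

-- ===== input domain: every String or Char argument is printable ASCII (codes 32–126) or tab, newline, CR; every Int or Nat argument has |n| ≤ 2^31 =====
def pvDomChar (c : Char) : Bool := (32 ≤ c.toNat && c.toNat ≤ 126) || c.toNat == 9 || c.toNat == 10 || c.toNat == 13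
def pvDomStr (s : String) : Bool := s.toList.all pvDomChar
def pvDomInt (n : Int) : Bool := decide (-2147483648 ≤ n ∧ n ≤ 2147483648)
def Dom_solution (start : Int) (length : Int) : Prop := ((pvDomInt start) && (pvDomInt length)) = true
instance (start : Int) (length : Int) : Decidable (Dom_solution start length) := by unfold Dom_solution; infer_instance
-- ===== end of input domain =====

-- B replaces A's row-by-row XOR of the staircase by a different algorithm of the same cost:
-- XOR of the whole contiguous span from the first cell to the last row's end, combined with
-- the XOR of the skipped gap ranges between consecutive rows (row starts in closed form
-- start + k*length instead of A's mutating start/right/i stepping). Objective: alternative.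

-- ===== PORT A =====
def getXOR (n : Int) : Int :=
  let remainder := PySem.Int.mod n 4
  if remainder = 0 then n
  else if remainder = 1 then 1
  else if remainder = 2 then n + 1
  else 0

def solutionLoop (i : Int) (checkSum : Option Int) (start : Int) (length : Int) : Option Int :=
  if h : 0 < length then
    let left := start - 1
    let right := start + length - 1
    let x := PySem.Int.bxor (getXOR left) (getXOR right)
    let checkSum' := match checkSum with
      | none => some x
      | some c => some (PySem.Int.bxor c x)
    solutionLoop (i + 1) checkSum' (right + i + 1) (length - 1)
  else checkSum
termination_by length.toNat
decreasing_by omega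

def solution (start : Int) (length : Int) : Option Int :=
  solutionLoop 0 none start length

-- ===== PORT B =====
-- (n, 1, n+1, 0)[n % 4]: n % 4 always lies in [0, 4), so the tuple index never misses
-- and pyGetD's default 0 is unreachable.
def fB (n : Int) : Int :=
  PySem.List.pyGetD [n, 1, n + 1, 0] (PySem.Int.mod n 4) 0

def solution_alt (start : Int) (length : Int) : Option Int :=
  if length ≤ 0 then none
  else
    let last := start + length * length - length
    let acc0 := PySem.Int.bxor (fB (start - 1)) (fB last)
    some ((PySem.List.pyRange 1 (length - 1)).foldl
      (fun acc k =>
        let lo := start + k * length + length - k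
        let hi := start + (k + 1) * length - 1
        PySem.Int.bxor acc (PySem.Int.bxor (fB (lo - 1)) (fB hi))) acc0)

-- ===== PRECONDITION & SPEC =====
def Spec_solution (start : Int) (length : Int) (out : Option Int) : Prop := out = solution_alt start length
instance (start : Int) (length : Int) (out : Option Int) : Decidable (Spec_solution start length out) := by unfold Spec_solution; infer_instance

-- ===== CLAIM (what is proved, stated in full; the proofs are below) =====
def Claim_equal_solution : Prop := ∀ (start : Int) (length : Int), Dom_solution start length → Spec_solution start length (solution start length)

-- ===== LEMMAS AND PROOFS =====

-- bridge: PySem.Int.bxor is core Int.xor (case analysis on the two signs)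
theorem bxor_eq_xor (a b : Int) : PySem.Int.bxor a b = Int.xor a b := by
  cases a with
  | ofNat m =>
    cases b with
    | ofNat n => simp [PySem.Int.bxor, Int.xor]
    | negSucc n => simp [PySem.Int.bxor, Int.xor, Int.negSucc_eq]; omega
  | negSucc m =>
    cases b with
    | ofNat n => simp [PySem.Int.bxor, Int.xor, Int.negSucc_eq]; omega
    | negSucc n => simp [PySem.Int.bxor, Int.xor, Int.negSucc_eq]; omega

theorem bxor_assoc (a b c : Int) :
    PySem.Int.bxor (PySem.Int.bxor a b) c = PySem.Int.bxor a (PySem.Int.bxor b c) := by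
  simp only [bxor_eq_xor]
  cases a <;> cases b <;> cases c <;> simp [Int.xor, Nat.xor_assoc]

theorem bxor_left_comm (a b c : Int) :
    PySem.Int.bxor a (PySem.Int.bxor b c) = PySem.Int.bxor b (PySem.Int.bxor a c) := by
  rw [← bxor_assoc, PySem.Int.bxor_comm a b, bxor_assoc]

theorem zero_bxor (a : Int) : PySem.Int.bxor 0 a = a := by
  rw [PySem.Int.bxor_comm]; exact PySem.Int.bxor_zero a

-- B's tuple-lookup closed form is A's getXOR
theorem fB_eq (n : Int) : fB n = getXOR n := by
  have h0 : 0 ≤ PySem.Int.mod n 4 := PySem.Int.mod_nonneg n (by norm_num)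
  have h4 : PySem.Int.mod n 4 < 4 := PySem.Int.mod_lt n (by norm_num)
  unfold fB getXOR
  have : PySem.Int.mod n 4 = 0 ∨ PySem.Int.mod n 4 = 1 ∨
      PySem.Int.mod n 4 = 2 ∨ PySem.Int.mod n 4 = 3 := by omega
  rcases this with h | h | h | h <;> rw [h] <;> rfl

-- the pure value A's loop accumulates: n remaining rows, current row start s, row-start step d
def rowsA : Nat → Int → Int → Int → Int
  | 0, _, _, c => c
  | n + 1, s, d, c =>
      rowsA n (s + d) d
        (PySem.Int.bxor c (PySem.Int.bxor (getXOR (s - 1)) (getXOR (s + (n + 1) - 1))))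

-- XOR of the gap terms between consecutive rows: m rows of widths m, m-1, …, 1 starting at s
def gapsX : Nat → Int → Int → Int
  | 0, _, _ => 0
  | 1, _, _ => 0
  | n + 2, s, d =>
      PySem.Int.bxor
        (PySem.Int.bxor (getXOR (s + (n + 1))) (getXOR (s + d - 1)))
        (gapsX (n + 1) (s + d) d)

-- A's loop with invariant i = d - n computes rowsA
theorem loopA (n : Nat) (d : Int) : ∀ (s c : Int),
    solutionLoop (d - n) (some c) s n = some (rowsA n s d c) := by
  induction n with
  | zero => intro s c; rw [solutionLoop]; simp [rowsA]
  | succ n ih =>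
    intro s c
    rw [solutionLoop]
    have hpos : (0 : Int) < ((n : Nat) + 1 : Nat) := by exact_mod_cast Nat.succ_pos n
    rw [dif_pos hpos]
    have h1 : s + ((n : Nat) + 1 : Nat) - 1 + (d - ((n : Nat) + 1 : Nat)) + 1 = s + d := by
      push_cast; ring
    have h2 : d - ((n : Nat) + 1 : Nat) + 1 = d - n := by push_cast; ring
    have h3 : ((n : Nat) + 1 : Nat) - (1 : Int) = (n : Nat) := by push_cast; ring
    simp only [h1, h2, h3, ih]
    simp [rowsA]

-- telescoping: the XOR of the n+1 row terms equals span endpoints XOR gap terms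
theorem rowsA_tele (n : Nat) : ∀ (s d c : Int),
    rowsA (n + 1) s d c =
      PySem.Int.bxor c
        (PySem.Int.bxor
          (PySem.Int.bxor (getXOR (s - 1)) (getXOR (s + n * d)))
          (gapsX (n + 1) s d)) := by
  induction n with
  | zero =>
    intro s d c
    simp [rowsA, gapsX, PySem.Int.bxor_zero]
  | succ n ih =>
    intro s d c
    show rowsA (n + 1) (s + d) d _ = _
    rw [ih]
    simp only [gapsX]
    have e1 : s + d + (n : Int) * d = s + ((n : Nat) + 1 : Nat) * d := by push_cast; ring
    have e3 : s + ((((n : Nat) + 1 : Nat) : Int) + 1) - 1 = s + (((n : Nat) : Int) + 1) := by push_cast; ring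
    rw [e1, e3]
    simp only [bxor_left_comm, PySem.Int.bxor_comm]

-- B's gap loop computes gapsX: j gaps left, next index k0, with L = k0 + j + 1 rows in total
theorem foldB (st L : Int) (j : Nat) : ∀ (k0 a : Int), k0 + j + 1 = L →
    (PySem.List.pyRange k0 (k0 + j)).foldl
      (fun acc k =>
        PySem.Int.bxor acc
          (PySem.Int.bxor (fB (st + k * L + L - k - 1)) (fB (st + (k + 1) * L - 1))))
      a
    = PySem.Int.bxor a (gapsX (j + 1) (st + k0 * L) L) := by
  induction j with
  | zero =>
    intro k0 a _
    simp [pysem, gapsX, PySem.Int.bxor_zero]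
  | succ j ih =>
    intro k0 a hL
    have hlt : k0 < k0 + ((j : Nat) + 1 : Nat) := by push_cast; omega
    rw [PySem.List.pyRange_one_cons hlt, List.foldl_cons]
    have hrange : k0 + 1 + (j : Int) = k0 + ((j : Nat) + 1 : Nat) := by push_cast; ring
    have := ih (k0 + 1)
      (PySem.Int.bxor a
        (PySem.Int.bxor (fB (st + k0 * L + L - k0 - 1)) (fB (st + (k0 + 1) * L - 1))))
      (by push_cast at hL ⊢; omega)
    rw [← hrange, this]
    show _ = PySem.Int.bxor a (gapsX ((j + 1) + 1) (st + k0 * L) L)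
    simp only [gapsX, fB_eq]
    have a1 : st + k0 * L + L - k0 - 1 = st + k0 * L + ((j : Int) + 1) := by
      push_cast at hL; linarith
    have a2 : st + (k0 + 1) * L - 1 = st + k0 * L + L - 1 := by ring
    have a3 : st + (k0 + 1) * L = st + k0 * L + L := by ring
    rw [a1, a2, a3]
    simp only [bxor_assoc]

-- ===== VERDICT (by name: the statement is the Claim_ definition above) =====
theorem solution_spec : Claim_equal_solution := by
  intro start length _
  unfold Spec_solution
  by_cases hle : length ≤ 0
  · rw [solution, solutionLoop]
    simp [solution_alt, hle]
  · have hlt : (0 : Int) < length := by omega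
    obtain ⟨n, hn⟩ : ∃ n : Nat, length = (n : Int) + 1 := by
      refine ⟨(length - 1).toNat, by omega⟩
    subst hn
    -- A side
    have hA : solution start ((n : Int) + 1) = some (rowsA (n + 1) start ((n : Int) + 1) 0) := by
      rw [solution, solutionLoop]
      have hpos : (0 : Int) < (n : Int) + 1 := by omega
      rw [dif_pos hpos]
      show solutionLoop (0 + 1)
          (some (PySem.Int.bxor (getXOR (start - 1)) (getXOR (start + ((n : Int) + 1) - 1))))
          (start + ((n : Int) + 1) - 1 + 0 + 1) ((n : Int) + 1 - 1) = _
      have h1 : start + ((n : Int) + 1) - 1 + 0 + 1 = start + ((n : Int) + 1) := by ring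
      have h2 : ((0 : Int) + 1) = ((n : Int) + 1) - ((n : Nat) : Int) := by ring
      have h3 : (n : Int) + 1 - 1 = ((n : Nat) : Int) := by ring
      rw [h1, h2, h3, loopA n ((n : Int) + 1) (start + ((n : Int) + 1))]
      show _ = some (rowsA n (start + ((n : Int) + 1)) ((n : Int) + 1)
        (PySem.Int.bxor 0 (PySem.Int.bxor (getXOR (start - 1)) (getXOR (start + (((n : Nat) + 1 : Nat) : Int) - 1)))))
      rw [zero_bxor]
      congr 3
    rw [hA, rowsA_tele, zero_bxor]
    have hle' : ¬ ((n : Int) + 1 ≤ 0) := by omega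
    cases n with
    | zero =>
      norm_num [solution_alt, pysem, gapsX, fB_eq, PySem.Int.bxor_zero]
    | succ m =>
      rw [solution_alt, if_neg hle']
      show some _ = some (List.foldl
          (fun acc k =>
            PySem.Int.bxor acc
              (PySem.Int.bxor (fB (start + k * ((↑(m+1) : Int) + 1) + ((↑(m+1) : Int) + 1) - k - 1))
                (fB (start + (k + 1) * ((↑(m+1) : Int) + 1) - 1))))
          (PySem.Int.bxor (fB (start - 1))
            (fB (start + ((↑(m+1) : Int) + 1) * ((↑(m+1) : Int) + 1) - ((↑(m+1) : Int) + 1))))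
          (PySem.List.pyRange 1 ((↑(m+1) : Int) + 1 - 1)))
      have hr : ((↑(m+1) : Int) + 1 - 1) = 1 + (m : Int) := by push_cast; ring
      rw [hr, foldB start ((↑(m+1) : Int) + 1) m 1 _ (by omega)]
      have hgap : gapsX (m + 1 + 1) start ((↑(m+1) : Int) + 1)
          = gapsX (m + 1) (start + ((↑(m+1) : Int) + 1)) ((↑(m+1) : Int) + 1) := by
        show PySem.Int.bxor
            (PySem.Int.bxor (getXOR (start + ((m : Nat) + 1 : Nat)))
              (getXOR (start + ((↑(m+1) : Int) + 1) - 1)))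
            (gapsX (m + 1) (start + ((↑(m+1) : Int) + 1)) ((↑(m+1) : Int) + 1)) = _
        have he : start + ((↑(m+1) : Int) + 1) - 1 = start + ((m : Nat) + 1 : Nat) := by push_cast; ring
        rw [he, PySem.Int.bxor_self, zero_bxor]
      rw [hgap, fB_eq, fB_eq]
      have e1 : start + ((↑(m+1) : Int) + 1) * ((↑(m+1) : Int) + 1) - ((↑(m+1) : Int) + 1)
          = start + (↑(m+1) : Int) * ((↑(m+1) : Int) + 1) := by ring
      have e2 : start + 1 * ((↑(m+1) : Int) + 1) = start + ((↑(m+1) : Int) + 1) := by ring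
      rw [e1, e2]
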